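-- pv_equiv track=rewrite | github.com/HanFayeDD/leetcode | company/xunlei/t2.py | extendresord
-- ===== SOURCE A (Python) =====
-- from typing import List
-- from typing import List
--
-- def extendresord(nums:List[int], k:int, flag:List[bool]):
--     r = []
--     for i in range(len(flag)):
--         if flag[i]:
--             left = i-1
--             right = i+1
--             nowk = 1
--             while left >= 0 and right <= len(nums)-1 and str(nums[left]) == str(nums[right])[::-1] and nowk < k:
--                 nowk += 2
--                 left -= 1
--                 right += 1
--             if nowk >= k:
--                 r.append(i-nowk//2)
--     return r
-- ===== SOURCE B (Python) =====
-- from typing import List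
--
-- def extendresord(nums: List[int], k: int, flag: List[bool]):
--     n = len(nums)
--     T = max(0, k // 2)
--     toks = [str(x) for x in nums]
--     rtoks = [t[::-1] for t in toks]
--     cand = [i for i in range(len(flag)) if flag[i] and (T == 0 or (T <= i < n - T))]
--     for s in range(1, T + 1):
--         if not cand:
--             break
--         cand = [i for i in cand if toks[i - s] == rtoks[i + s]]
--     return [i - T for i in cand]
-- ===== Notes on version B (the rewrite author's own statement) =====
-- stated objective: alternative
-- what changed: Replaces A's per-center while-expansion with a layered sieve: token/reversed-token tables are built once, all in-window flagged centers become a candidate list, and the list is filtered once per radius s = 1..k//2 (loops transposed: outer over radius, inner over surviving candidates), finally emitting i - k//2.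
import Mathlib
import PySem

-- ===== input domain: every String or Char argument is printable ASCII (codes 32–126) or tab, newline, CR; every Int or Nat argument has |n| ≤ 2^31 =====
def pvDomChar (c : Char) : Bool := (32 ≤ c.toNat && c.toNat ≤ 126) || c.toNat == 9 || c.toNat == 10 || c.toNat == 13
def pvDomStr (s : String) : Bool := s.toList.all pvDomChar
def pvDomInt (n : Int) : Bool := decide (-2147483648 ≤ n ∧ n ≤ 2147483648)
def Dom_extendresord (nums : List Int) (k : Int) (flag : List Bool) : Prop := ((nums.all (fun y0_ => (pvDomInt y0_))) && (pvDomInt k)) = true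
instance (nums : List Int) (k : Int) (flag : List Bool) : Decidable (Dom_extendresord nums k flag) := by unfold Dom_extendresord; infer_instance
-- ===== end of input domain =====

-- B replaces A's per-center while-expansion with a layered sieve: token tables built once,
-- the in-window flagged centers form a candidate list which is filtered once per radius
-- s = 1..k//2 (loops transposed); objective: alternative (same exact results).

-- ===== PORT A =====
-- inner while-loop of A; fuel = (left+1).toNat iterations suffice since each iteration requires
-- left ≥ 0 and decrements left.  str(y)[::-1] is ported as list reversal of str(y)'s characters.
def extendLoopA (nums : List Int) (k : Int) : Nat → Int → Int → Int → Int
  | 0, _, _, nowk => nowk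
  | fuel+1, left, right, nowk =>
      if left ≥ 0 ∧ right ≤ PySem.List.len nums - 1 ∧
         PySem.Int.toChars (PySem.List.pyGetD nums left 0)
           = (PySem.Int.toChars (PySem.List.pyGetD nums right 0)).reverse ∧
         nowk < k
      then extendLoopA nums k fuel (left-1) (right+1) (nowk+2)
      else nowk

def extendresord (nums : List Int) (k : Int) (flag : List Bool) : List Int :=
  (PySem.List.pyRange 0 (PySem.List.len flag) 1).foldl
    (fun r i =>
      if PySem.List.pyGetD flag i false then
        let nowk := extendLoopA nums k i.toNat (i - 1) (i + 1) 1
        if nowk ≥ k then r ++ [i - PySem.Int.floordiv nowk 2] else r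
      else r) []

-- ===== PORT B =====
-- the sieve rounds: 'for s in range(1, T+1): if not cand: break; cand = [i for i in cand if …]';
-- fuel = T = number of rounds (range(1, T+1)), s the current radius
def sieveB (toks rtoks : List (List Char)) : Nat → Int → List Int → List Int
  | 0, _, c => c
  | fuel+1, s, c =>
    if c = [] then c
    else sieveB toks rtoks fuel (s + 1)
      (c.filter (fun i =>
        PySem.List.pyGetD toks (i - s) [] == PySem.List.pyGetD rtoks (i + s) []))

def extendresord_alt (nums : List Int) (k : Int) (flag : List Bool) : List Int :=
  let n := PySem.List.len nums
  let T := max 0 (PySem.Int.floordiv k 2)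
  let toks := nums.map PySem.Int.toChars
  let rtoks := toks.map List.reverse
  let cand0 := (PySem.List.pyRange 0 (PySem.List.len flag) 1).filter
    (fun i => PySem.List.pyGetD flag i false &&
      (decide (T = 0) || (decide (T ≤ i) && decide (i < n - T))))
  let cand := sieveB toks rtoks T.toNat 1 cand0
  cand.map (fun i => i - T)

-- ===== PRECONDITION & SPEC =====
def Spec_extendresord (nums : List Int) (k : Int) (flag : List Bool) (out : List Int) : Prop := out = extendresord_alt nums k flag
instance (nums : List Int) (k : Int) (flag : List Bool) (out : List Int) : Decidable (Spec_extendresord nums k flag out) := by unfold Spec_extendresord; infer_instance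

-- ===== CLAIM (what is proved, stated in full; the proofs are below) =====
def Claim_equal_extendresord : Prop := ∀ (nums : List Int) (k : Int) (flag : List Bool), Dom_extendresord nums k flag → Spec_extendresord nums k flag (extendresord nums k flag)

-- ===== LEMMAS AND PROOFS =====

-- the pair condition A checks at expansion step s (s = 1, 2, …)
def stepOK (nums : List Int) (i : Int) (s : Nat) : Prop :=
  i - s ≥ 0 ∧ i + s ≤ PySem.List.len nums - 1 ∧
  PySem.Int.toChars (PySem.List.pyGetD nums (i - s) 0)
    = (PySem.Int.toChars (PySem.List.pyGetD nums (i + s) 0)).reverse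

-- every expansion step after t (up to the required radius) succeeds
def allPass (nums : List Int) (k i : Int) (t : Nat) : Prop :=
  ∀ s : Nat, t < s → (s : Int) ≤ max 0 (PySem.Int.floordiv k 2) → stepOK nums i s

-- nowk < k at step t  ↔  t < T  (T = max 0 (k // 2))
theorem nowk_lt_iff (k : Int) (t : Nat) :
    (2 * (t : Int) + 1 < k) ↔ (t : Int) < max 0 (PySem.Int.floordiv k 2) := by
  rw [PySem.Int.floordiv_eq_ediv_of_pos (by omega : (0:Int) < 2)]
  omega

-- loop characterization: from the state reached after t successful steps
-- (left = i-t-1, right = i+t+1, nowk = 2t+1, fuel = (i-t).toNat), the loop returns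
-- 2*T+1 iff every remaining step succeeds, and a value < k otherwise.
theorem extendLoopA_char (nums : List Int) (k i : Int) :
    ∀ d t : Nat, (t : Int) + d = max 0 (PySem.Int.floordiv k 2) →
    ((extendLoopA nums k (i - t).toNat (i - t - 1) (i + t + 1) (2 * t + 1)
        = 2 * max 0 (PySem.Int.floordiv k 2) + 1) ↔ allPass nums k i t) ∧
    (¬ allPass nums k i t →
      extendLoopA nums k (i - t).toNat (i - t - 1) (i + t + 1) (2 * t + 1) < k) := by
  intro d
  induction d with
  | zero =>
    intro t ht
    have htT : (t : Int) = max 0 (PySem.Int.floordiv k 2) := by push_cast at ht; omega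
    have hvac : allPass nums k i t := by
      intro s hs1 hs2
      have hcast : (t : Int) < s := by exact_mod_cast hs1
      exact absurd hs2 (by omega)
    have hres : extendLoopA nums k (i - t).toNat (i - t - 1) (i + t + 1) (2 * t + 1)
        = 2 * t + 1 := by
      cases hf : (i - (t : Int)).toNat with
      | zero => rfl
      | succ m =>
        simp only [extendLoopA]
        rw [if_neg]
        rintro ⟨-, -, -, hlt⟩
        rw [nowk_lt_iff] at hlt
        omega
    refine ⟨⟨fun _ => hvac, fun _ => by rw [hres]; omega⟩, fun hna => absurd hvac hna⟩
  | succ d ih =>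
    intro t ht
    have htlt : (t : Int) < max 0 (PySem.Int.floordiv k 2) := by push_cast at ht; omega
    have hcast1 : (((t + 1 : Nat)) : Int) = (t : Int) + 1 := by push_cast; ring
    by_cases hC : stepOK nums i (t + 1)
    · -- the step succeeds: one unfolding reaches the state for t+1
      unfold stepOK at hC
      obtain ⟨hc1, hc2, hc3⟩ := hC
      rw [hcast1] at hc1 hc2 hc3
      have hb : (0:Int) ≤ i - t - 1 := by omega
      have hfuel : (i - (t : Int)).toNat = (i - ((t + 1 : Nat) : Int)).toNat + 1 := by
        rw [hcast1]; omega
      obtain ⟨ih1, ih2⟩ := ih (t + 1) (by rw [hcast1]; push_cast at ht ⊢; omega)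
      have hred : extendLoopA nums k (i - t).toNat (i - t - 1) (i + t + 1) (2 * t + 1)
          = extendLoopA nums k (i - ((t + 1 : Nat) : Int)).toNat
              (i - ((t + 1 : Nat) : Int) - 1) (i + ((t + 1 : Nat) : Int) + 1)
              (2 * ((t + 1 : Nat) : Int) + 1) := by
        rw [hfuel]
        simp only [extendLoopA]
        rw [if_pos]
        · rw [hcast1]
          congr 1 <;> ring
        · refine ⟨by omega, by omega, ?_, (nowk_lt_iff k t).mpr htlt⟩
          have e1 : i - ((t:Int) + 1) = i - t - 1 := by ring
          have e2 : i + ((t:Int) + 1) = i + t + 1 := by ring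
          rw [e1, e2] at hc3
          exact hc3
      have hAP : allPass nums k i t ↔ allPass nums k i (t + 1) := by
        constructor
        · intro h s hs1 hs2; exact h s (by omega) hs2
        · intro h s hs1 hs2
          rcases Nat.lt_or_ge (t + 1) s with h' | h'
          · exact h s h' hs2
          · have hs : s = t + 1 := by omega
            subst hs
            unfold stepOK
            rw [hcast1]
            exact ⟨hc1, hc2, hc3⟩
      refine ⟨?_, ?_⟩
      · rw [hred, ih1, hAP]
      · intro hna
        rw [hred]
        exact ih2 (fun hap => hna (hAP.mpr hap))
    · -- the step fails: the loop stops with nowk = 2t+1 < k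
      have hres : extendLoopA nums k (i - t).toNat (i - t - 1) (i + t + 1) (2 * t + 1)
          = 2 * t + 1 := by
        cases hf : (i - (t : Int)).toNat with
        | zero => rfl
        | succ m =>
          simp only [extendLoopA]
          rw [if_neg]
          rintro ⟨h1, h2, h3, -⟩
          apply hC
          unfold stepOK
          rw [hcast1]
          have e1 : i - ((t:Int) + 1) = i - (t:Int) - 1 := by ring
          have e2 : i + ((t:Int) + 1) = i + (t:Int) + 1 := by ring
          rw [e1, e2]
          exact ⟨by omega, by omega, h3⟩
      refine ⟨⟨?_, ?_⟩, ?_⟩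
      · intro h; rw [hres] at h; omega
      · intro hap
        exact absurd (hap (t + 1) (by omega) (by rw [hcast1]; omega)) hC
      · intro _
        rw [hres]
        exact (nowk_lt_iff k t).mpr htlt

-- specialisation to the loop's initial state (t = 0)
theorem loopRes_iff (nums : List Int) (k i : Int) :
    ((k ≤ extendLoopA nums k i.toNat (i - 1) (i + 1) 1) ↔ allPass nums k i 0) ∧
    (allPass nums k i 0 → extendLoopA nums k i.toNat (i - 1) (i + 1) 1
        = 2 * max 0 (PySem.Int.floordiv k 2) + 1) := by
  have hT0 : (0:Int) ≤ max 0 (PySem.Int.floordiv k 2) := le_max_left _ _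
  have hchar := extendLoopA_char nums k i (max 0 (PySem.Int.floordiv k 2)).toNat 0
    (by push_cast; omega)
  simp only [Nat.cast_zero, sub_zero, add_zero, mul_zero, zero_add] at hchar
  have hkle : k ≤ 2 * max 0 (PySem.Int.floordiv k 2) + 1 := by
    have := nowk_lt_iff k (max 0 (PySem.Int.floordiv k 2)).toNat
    push_cast at this
    omega
  refine ⟨⟨?_, ?_⟩, hchar.1.mpr⟩
  · intro hk
    by_contra hna
    have := hchar.2 hna
    omega
  · intro hap
    rw [hchar.1.mpr hap]
    exact hkle

-- indexing the precomputed tables of B = indexing nums and converting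
theorem getStr_eq (nums : List Int) (j : Int) (h0 : 0 ≤ j) (h1 : j < (nums.length : Int)) :
    PySem.List.pyGetD (nums.map PySem.Int.toChars) j []
      = PySem.Int.toChars (PySem.List.pyGetD nums j 0) := by
  rw [PySem.List.pyGetD_eq_getElem _ _ h0 (by simpa using h1),
      PySem.List.pyGetD_eq_getElem _ _ h0 h1]
  simp

theorem getRev_eq (nums : List Int) (j : Int) (h0 : 0 ≤ j) (h1 : j < (nums.length : Int)) :
    PySem.List.pyGetD ((nums.map PySem.Int.toChars).map List.reverse) j []
      = (PySem.Int.toChars (PySem.List.pyGetD nums j 0)).reverse := by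
  rw [PySem.List.pyGetD_eq_getElem _ _ h0 (by simpa using h1),
      PySem.List.pyGetD_eq_getElem _ _ h0 h1]
  simp

-- folding round-by-round filters = a single filter by the conjunction over all rounds
theorem foldl_filter_eq (q : Int → Int → Bool) :
    ∀ (L : List Int) (c0 : List Int),
    L.foldl (fun c s => c.filter (q s)) c0 = c0.filter (fun i => L.all (fun s => q s i)) := by
  intro L
  induction L with
  | nil => intro c0; simp
  | cons s L ih =>
    intro c0
    simp only [List.foldl_cons, ih, List.filter_filter, List.all_cons]
    apply List.filter_congr
    intro i _
    cases q s i <;> simp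

-- a round-filter fold started from the empty candidate list stays empty
theorem foldl_filter_nil (q : Int → Int → Bool) :
    ∀ (L : List Int), L.foldl (fun c s => c.filter (q s)) ([] : List Int) = [] := by
  intro L
  induction L with
  | nil => rfl
  | cons s L ih => simpa using ih

-- the early-exit sieve computes the same fold of round filters
theorem sieveB_eq (toks rtoks : List (List Char)) :
    ∀ (fuel : Nat) (s : Int) (c : List Int),
    sieveB toks rtoks fuel s c =
      (PySem.List.pyRange s (s + fuel) 1).foldl
        (fun c t => c.filter (fun i =>
          PySem.List.pyGetD toks (i - t) [] == PySem.List.pyGetD rtoks (i + t) [])) c := by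
  intro fuel
  induction fuel with
  | zero =>
    intro s c
    rw [PySem.List.pyRange_one_eq_nil (by omega)]
    rfl
  | succ fuel ih =>
    intro s c
    rw [PySem.List.pyRange_one_cons (by push_cast; omega)]
    by_cases hc : c = []
    · subst hc
      simp only [sieveB, List.foldl_cons, List.filter_nil, foldl_filter_nil, if_true]
    · simp only [sieveB, if_neg hc, List.foldl_cons, ih]
      congr 2
      push_cast
      ring

-- B's window guard plus its per-round pair checks over range(1, T+1) say exactly that
-- every expansion step succeeds
theorem allcheck_iff (nums : List Int) (k i : Int) :
    (((decide (max 0 (PySem.Int.floordiv k 2) = 0) ||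
        (decide (max 0 (PySem.Int.floordiv k 2) ≤ i) &&
         decide (i < PySem.List.len nums - max 0 (PySem.Int.floordiv k 2)))) &&
      (PySem.List.pyRange 1 (max 0 (PySem.Int.floordiv k 2) + 1) 1).all
        (fun s => PySem.List.pyGetD (nums.map PySem.Int.toChars) (i - s) [] ==
          PySem.List.pyGetD ((nums.map PySem.Int.toChars).map List.reverse) (i + s) []))
       = true)
    ↔ allPass nums k i 0 := by
  have hM0 : (0:Int) ≤ max 0 (PySem.Int.floordiv k 2) := le_max_left _ _
  simp only [Bool.and_eq_true, Bool.or_eq_true, decide_eq_true_eq, List.all_eq_true,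
    beq_iff_eq, PySem.List.len_eq]
  constructor
  · rintro ⟨hb, hall⟩ s hs1 hs2
    have hs1' : (1:Int) ≤ (s:Int) := by exact_mod_cast hs1
    have hbnd : max 0 (PySem.Int.floordiv k 2) ≤ i ∧
        i < (nums.length : Int) - max 0 (PySem.Int.floordiv k 2) := by
      rcases hb with hb | hb
      · omega
      · exact hb
    have hm : ((s : Int)) ∈ PySem.List.pyRange 1 (max 0 (PySem.Int.floordiv k 2) + 1) 1 :=
      PySem.List.mem_pyRange_one.mpr ⟨by omega, by omega⟩
    have heq := hall _ hm
    unfold stepOK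
    refine ⟨by omega, by simp only [PySem.List.len_eq]; omega, ?_⟩
    rw [getStr_eq nums _ (by omega) (by omega), getRev_eq nums _ (by omega) (by omega)] at heq
    exact heq
  · intro h
    constructor
    · by_cases hM : max 0 (PySem.Int.floordiv k 2) = 0
      · exact Or.inl hM
      · refine Or.inr ?_
        have hstep := h (max 0 (PySem.Int.floordiv k 2)).toNat (by omega) (by omega)
        unfold stepOK at hstep
        have hsn : (((max 0 (PySem.Int.floordiv k 2)).toNat : Int))
            = max 0 (PySem.Int.floordiv k 2) := by omega
        rw [hsn] at hstep
        obtain ⟨h1, h2, -⟩ := hstep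
        simp only [PySem.List.len_eq] at h2
        omega
    · intro s hm
      obtain ⟨hm1, hm2⟩ := PySem.List.mem_pyRange_one.mp hm
      have hsn : ((s.toNat : Int)) = s := by omega
      have hstep := h s.toNat (by omega) (by omega)
      unfold stepOK at hstep
      rw [hsn] at hstep
      obtain ⟨h1, h2, h3⟩ := hstep
      simp only [PySem.List.len_eq] at h2
      rw [getStr_eq nums _ (by omega) (by omega), getRev_eq nums _ (by omega) (by omega)]
      exact h3

-- port A as filter-then-map over the same range (PySem.List.foldl_append_if)
theorem portA_eq (nums : List Int) (k : Int) (flag : List Bool) :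
    extendresord nums k flag =
      ((PySem.List.pyRange 0 (PySem.List.len flag) 1).filter
        (fun i => PySem.List.pyGetD flag i false &&
          decide (k ≤ extendLoopA nums k i.toNat (i - 1) (i + 1) 1))).map
      (fun i => i - PySem.Int.floordiv (extendLoopA nums k i.toNat (i - 1) (i + 1) 1) 2) := by
  simp only [extendresord]
  have h1 : (fun (r : List Int) (i : Int) =>
      if PySem.List.pyGetD flag i false then
        let nowk := extendLoopA nums k i.toNat (i - 1) (i + 1) 1
        if nowk ≥ k then r ++ [i - PySem.Int.floordiv nowk 2] else r
      else r) =
      (fun (r : List Int) (i : Int) =>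
        if (PySem.List.pyGetD flag i false &&
            decide (k ≤ extendLoopA nums k i.toNat (i - 1) (i + 1) 1)) = true then
          r ++ [i - PySem.Int.floordiv (extendLoopA nums k i.toNat (i - 1) (i + 1) 1) 2]
        else r) := by
    funext r i
    by_cases hf : PySem.List.pyGetD flag i false = true
    · by_cases hk : k ≤ extendLoopA nums k i.toNat (i - 1) (i + 1) 1 <;>
        simp [hf, hk, ge_iff_le]
    · simp [hf]
  rw [h1]
  exact PySem.List.foldl_append_if _ _ _ []

theorem floordiv_odd (T : Int) (_hT : 0 ≤ T) : PySem.Int.floordiv (2 * T + 1) 2 = T := by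
  rw [PySem.Int.floordiv_eq_ediv_of_pos (by omega : (0:Int) < 2)]
  omega

-- ===== VERDICT (by name: the statement is the Claim_ definition above) =====
theorem extendresord_spec : Claim_equal_extendresord := by
  intro nums k flag _
  unfold Spec_extendresord
  rw [portA_eq]
  simp only [extendresord_alt]
  rw [sieveB_eq, (by omega : (1 : Int) + (max 0 (PySem.Int.floordiv k 2)).toNat
        = max 0 (PySem.Int.floordiv k 2) + 1)]
  rw [foldl_filter_eq]
  rw [List.filter_filter]
  have hfilter : (PySem.List.pyRange 0 (PySem.List.len flag) 1).filter
      (fun i => PySem.List.pyGetD flag i false &&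
        decide (k ≤ extendLoopA nums k i.toNat (i - 1) (i + 1) 1)) =
      (PySem.List.pyRange 0 (PySem.List.len flag) 1).filter
      (fun i =>
        (PySem.List.pyRange 1 (max 0 (PySem.Int.floordiv k 2) + 1) 1).all
          (fun s => PySem.List.pyGetD (nums.map PySem.Int.toChars) (i - s) [] ==
            PySem.List.pyGetD ((nums.map PySem.Int.toChars).map List.reverse) (i + s) []) &&
        (PySem.List.pyGetD flag i false &&
          (decide (max 0 (PySem.Int.floordiv k 2) = 0) ||
            (decide (max 0 (PySem.Int.floordiv k 2) ≤ i) &&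
             decide (i < PySem.List.len nums - max 0 (PySem.Int.floordiv k 2)))))) := by
    apply List.filter_congr
    intro i _
    cases hf : PySem.List.pyGetD flag i false
    · simp
    · simp only [Bool.true_and]
      rw [Bool.eq_iff_iff, decide_eq_true_iff, Bool.and_comm, Bool.and_eq_true, ← Bool.and_eq_true,
        allcheck_iff]
      exact (loopRes_iff nums k i).1
  rw [hfilter]
  apply List.map_congr_left
  intro i hi
  rw [List.mem_filter] at hi
  obtain ⟨-, hp⟩ := hi
  simp only [Bool.and_eq_true] at hp
  have hap : allPass nums k i 0 := (allcheck_iff nums k i).mp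
    (by rw [Bool.and_eq_true]; exact ⟨hp.2.2, hp.1⟩)
  rw [(loopRes_iff nums k i).2 hap, floordiv_odd _ (le_max_left _ _)]
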